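-- pv_equiv track=rewrite | github.com/AlokinWolffe/job-application-0.1 | exercise2.py | best_day_for_location
-- ===== SOURCE A (Python) =====
-- volunteers = {
--     "Anna": {
--         "availability": ["pondělí", "úterý", "pátek"],
--         "locations": ["Praha", "Brno"]
--     },
--     "Boris": {
--         "availability": ["středa", "čtvrtek", "pátek"],
--         "locations": ["Brno"]
--     },
--     "Cyril": {
--         "availability": ["pondělí", "pátek"],
--         "locations": ["Praha"]
--     },
--     "Dana": {
--         "availability": ["úterý", "čtvrtek"],
--         "locations": ["Ostrava"]
--     },
--     "Eva": {
--         "availability": ["pondělí", "úterý", "středa", "čtvrtek", "pátek"],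
--         "locations": ["Praha", "Brno", "Ostrava"]
--     }
-- }
--
-- def best_day_for_location(location: str):
--
--     days = {
--         "pondělí": {
--             "volunteers": []
--         },
--         "úterý": {
--             "volunteers": []
--         },
--         "středa": {
--             "volunteers": []
--         },
--         "čtvrtek": {
--             "volunteers": []
--         },
--         "pátek": {
--             "volunteers": []
--         },
--     }
--
--     for key in volunteers:
--         if location in volunteers[key]["locations"]:
--             for day in volunteers[key]["availability"]:
--                 days[day]["volunteers"].append(key)
--
--     best_day_val = 0
--     best_day = ""
--
--     for key in days:
--         if len(days[key]["volunteers"]) >= best_day_val: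
--             best_day_val = len(days[key]["volunteers"])
--             best_day = key
--
--     return (best_day, days[best_day]["volunteers"])
-- ===== SOURCE B (Python) =====
-- volunteers = {
--     "Anna": {
--         "availability": ["pondělí", "úterý", "pátek"],
--         "locations": ["Praha", "Brno"]
--     },
--     "Boris": {
--         "availability": ["středa", "čtvrtek", "pátek"],
--         "locations": ["Brno"]
--     },
--     "Cyril": {
--         "availability": ["pondělí", "pátek"],
--         "locations": ["Praha"]
--     },
--     "Dana": {
--         "availability": ["úterý", "čtvrtek"],
--         "locations": ["Ostrava"]
--     },
--     "Eva": {
--         "availability": ["pondělí", "úterý", "středa", "čtvrtek", "pátek"],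
--         "locations": ["Praha", "Brno", "Ostrava"]
--     }
-- }
--
-- DAYS = ["pondělí", "úterý", "středa", "čtvrtek", "pátek"]
--
-- def best_day_for_location(location: str):
--     # per-day gather: for each day in fixed order, scan all volunteers
--     best_day = ""
--     best_list = []
--     best_val = 0
--     for day in DAYS:
--         todays = [name for name, info in volunteers.items()
--                   if location in info["locations"] and day in info["availability"]]
--         if len(todays) >= best_val:
--             best_day, best_list, best_val = day, todays, len(todays)
--     return (best_day, best_list)
-- ===== Notes on version B (the rewrite author's own statement) =====
-- stated objective: idiomatic
-- what changed: B replaces A's distributing pass (each matching volunteer appended into a day-keyed dict of lists, then a dict scan for the max) with a per-day gather: for each of the five days in fixed order it scans the volunteers for those matching both the location and that day, tracking the best day with an explicit >= loop; no dict is built.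
import Mathlib
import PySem

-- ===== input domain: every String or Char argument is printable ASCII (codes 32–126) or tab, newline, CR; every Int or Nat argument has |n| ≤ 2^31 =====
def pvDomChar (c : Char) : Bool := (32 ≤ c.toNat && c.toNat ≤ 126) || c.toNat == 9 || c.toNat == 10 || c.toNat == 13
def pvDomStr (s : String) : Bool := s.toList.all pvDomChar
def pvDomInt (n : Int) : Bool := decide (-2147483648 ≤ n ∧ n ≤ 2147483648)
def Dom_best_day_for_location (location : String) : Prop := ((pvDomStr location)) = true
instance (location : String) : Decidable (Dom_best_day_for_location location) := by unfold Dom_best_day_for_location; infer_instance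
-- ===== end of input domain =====

-- B gathers per day (fixed day order, scanning volunteers for each day) instead of
-- distributing each volunteer into a day dict; same return value, objective: idiomatic.

-- ===== PORT A =====
-- module-level constant `volunteers`: name ↦ (availability, locations)
def volunteersA : List (String × (List String × List String)) :=
  [ ("Anna",  (["pondělí", "úterý", "pátek"], ["Praha", "Brno"])),
    ("Boris", (["středa", "čtvrtek", "pátek"], ["Brno"])),
    ("Cyril", (["pondělí", "pátek"], ["Praha"])),
    ("Dana",  (["úterý", "čtvrtek"], ["Ostrava"])),
    ("Eva",   (["pondělí", "úterý", "středa", "čtvrtek", "pátek"], ["Praha", "Brno", "Ostrava"])) ]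

def best_day_for_location (location : String) : String × List String :=
  let days0 : PySem.Dict String (List String) :=
    ((((PySem.Dict.empty.insert "pondělí" []).insert "úterý" []).insert "středa" []).insert "čtvrtek" []).insert "pátek" []
  let days := volunteersA.foldl (fun d kv =>
    if location ∈ kv.2.2 then
      kv.2.1.foldl (fun d day => d.modify day [] (fun l => l ++ [kv.1])) d
    else d) days0
  let best := days.keys.foldl (fun (acc : Int × String) key =>
      if ((days.getD key []).length : Int) ≥ acc.1 then (((days.getD key []).length : Int), key) else acc)
    (0, "")
  (best.2, days.getD best.2 [])

-- ===== PORT B =====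
def volunteersB : List (String × (List String × List String)) :=
  [ ("Anna",  (["pondělí", "úterý", "pátek"], ["Praha", "Brno"])),
    ("Boris", (["středa", "čtvrtek", "pátek"], ["Brno"])),
    ("Cyril", (["pondělí", "pátek"], ["Praha"])),
    ("Dana",  (["úterý", "čtvrtek"], ["Ostrava"])),
    ("Eva",   (["pondělí", "úterý", "středa", "čtvrtek", "pátek"], ["Praha", "Brno", "Ostrava"])) ]

def daysListB : List String := ["pondělí", "úterý", "středa", "čtvrtek", "pátek"]

def best_day_for_location_alt (location : String) : String × List String :=
  let best := daysListB.foldl (fun (acc : String × List String × Int) day =>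
      let todays := volunteersB.filterMap (fun kv =>
        if location ∈ kv.2.2 ∧ day ∈ kv.2.1 then some kv.1 else none)
      if ((todays.length : Int)) ≥ acc.2.2 then (day, todays, (todays.length : Int)) else acc)
    ("", [], 0)
  (best.1, best.2.1)

-- ===== PRECONDITION & SPEC =====
def Spec_best_day_for_location (location : String) (out : String × List String) : Prop := out = best_day_for_location_alt location
instance (location : String) (out : String × List String) : Decidable (Spec_best_day_for_location location out) := by unfold Spec_best_day_for_location; infer_instance

-- ===== CLAIM (what is proved, stated in full; the proofs are below) =====
def Claim_equal_best_day_for_location : Prop := ∀ (location : String), Dom_best_day_for_location location → Spec_best_day_for_location location (best_day_for_location location)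

-- ===== LEMMAS AND PROOFS =====

-- ===== VERDICT (by name: the statement is the Claim_ definition above) =====
theorem best_day_for_location_spec : Claim_equal_best_day_for_location := by
  intro location _
  unfold Spec_best_day_for_location
  by_cases h1 : location = "Praha"
  · subst h1; decide
  · by_cases h2 : location = "Brno"
    · subst h2; decide
    · by_cases h3 : location = "Ostrava"
      · subst h3; decide
      · simp [best_day_for_location, best_day_for_location_alt, volunteersA, volunteersB,
              daysListB, h1, h2, h3]
        decide
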